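-- pv_equiv track=rewrite | github.com/ShinsakuOkazaki/DataScience | Assign2-3.py | generateCombsDict
-- ===== SOURCE A (Python) =====
-- def generateCombsDict(combs, items):
--     combs_dict ={}
--     for k in combs:
--         combs_dict[k] = 0
--     for comb in combs:
--         for item in items:
--             if set(comb).issubset(item):
--                 combs_dict[comb] += 1
--     return combs_dict
-- ===== SOURCE B (Python) =====
-- def generateCombsDict(combs, items):
--     # Count each distinct comb once: multiplicity counter, precomputed item sets,
--     # one scan of the items per DISTINCT comb, result = multiplicity * match count.
--     mult = {}
--     for comb in combs:
--         key = tuple(comb)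
--         mult[key] = mult.get(key, 0) + 1
--     item_sets = [set(item) for item in items]
--     res = {}
--     for key, m in mult.items():
--         s = set(key)
--         n = 0
--         for it in item_sets:
--             if s.issubset(it):
--                 n += 1
--         res[key] = m * n
--     return res
-- ===== Notes on version B (the rewrite author's own statement) =====
-- stated objective: faster
-- what changed: B builds a multiplicity counter over the combs, precomputes each item's element set once, scans the items once per DISTINCT comb and multiplies the match count by the comb's multiplicity, instead of A's per-occurrence nested subset-testing loop that rebuilds set(comb) and increments the dict for every (comb, item) pair.
import Mathlib
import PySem

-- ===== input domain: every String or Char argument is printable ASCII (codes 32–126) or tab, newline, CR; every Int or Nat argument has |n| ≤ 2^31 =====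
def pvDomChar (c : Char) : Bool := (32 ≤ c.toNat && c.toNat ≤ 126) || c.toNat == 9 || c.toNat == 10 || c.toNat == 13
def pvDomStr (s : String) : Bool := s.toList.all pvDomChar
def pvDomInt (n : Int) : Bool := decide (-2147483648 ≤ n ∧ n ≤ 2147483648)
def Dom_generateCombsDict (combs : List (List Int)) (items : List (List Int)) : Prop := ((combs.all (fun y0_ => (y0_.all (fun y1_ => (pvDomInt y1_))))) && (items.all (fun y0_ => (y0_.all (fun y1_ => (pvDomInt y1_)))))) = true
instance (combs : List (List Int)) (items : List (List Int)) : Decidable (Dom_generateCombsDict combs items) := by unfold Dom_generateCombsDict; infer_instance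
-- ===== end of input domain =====

-- B groups duplicate combs with a multiplicity counter, scans the items once per DISTINCT
-- comb (with item sets built once) and multiplies, instead of A's per-occurrence,
-- per-item subset testing with repeated dict increments.

-- ===== PORT A =====
def generateCombsDict (combs : List (List Int)) (items : List (List Int)) : List (List Int × Int) :=
  -- combs_dict = {}; for k in combs: combs_dict[k] = 0
  let d0 : PySem.Dict (List Int) Int := combs.foldl (fun d k => d.insert k 0) PySem.Dict.empty
  -- for comb in combs: for item in items: if set(comb).issubset(item): combs_dict[comb] += 1
  let d1 : PySem.Dict (List Int) Int := combs.foldl (fun d comb =>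
    items.foldl (fun d item =>
      if PySem.Set.issubset (PySem.Set.ofList comb) item then
        d.modify comb 0 (fun v => v + 1)   -- key present from the first loop
      else d) d) d0
  d1.items

-- ===== PORT B =====
def generateCombsDict_alt (combs : List (List Int)) (items : List (List Int)) : List (List Int × Int) :=
  -- mult[key] = mult.get(key, 0) + 1
  let mult : PySem.Dict (List Int) Int :=
    combs.foldl (fun d comb => d.insert comb (d.getD comb 0 + 1)) PySem.Dict.empty
  -- item_sets = [set(item) for item in items]
  let itemSets : List (PySem.Set Int) := items.map (fun item => PySem.Set.ofList item)
  -- for key, m in mult.items(): res[key] = m * (number of item sets containing set(key))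
  let res : PySem.Dict (List Int) Int :=
    mult.items.foldl (fun r p =>
      let s : PySem.Set Int := PySem.Set.ofList p.1
      let n : Int := itemSets.foldl (fun n it => if PySem.Set.issubset s it then n + 1 else n) 0
      r.insert p.1 (p.2 * n)) PySem.Dict.empty
  res.items

-- ===== PRECONDITION & SPEC =====
def Spec_generateCombsDict (combs : List (List Int)) (items : List (List Int)) (out : List (List Int × Int)) : Prop := out = generateCombsDict_alt combs items
instance (combs : List (List Int)) (items : List (List Int)) (out : List (List Int × Int)) : Decidable (Spec_generateCombsDict combs items out) := by unfold Spec_generateCombsDict; infer_instance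

-- ===== CLAIM (what is proved, stated in full; the proofs are below) =====
def Claim_equal_generateCombsDict : Prop := ∀ (combs : List (List Int)) (items : List (List Int)), Dom_generateCombsDict combs items → Spec_generateCombsDict combs items (generateCombsDict combs items)

-- ===== LEMMAS AND PROOFS =====

-- the match count of a comb: how many items its element set is a subset of
def pvM (items : List (List Int)) (k : List Int) : Int :=
  (items.countP (fun item => PySem.Set.issubset (PySem.Set.ofList k) item) : Int)

-- both ports compute a dict whose items are this canonical list
def pvCanon (combs : List (List Int)) (items : List (List Int)) : List (List Int × Int) :=
  (PySem.Set.ofList combs).map (fun k => (k, (combs.count k : Int) * pvM items k))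

-- A's inner loop: the value at k gains the match count when k = comb, else nothing
theorem pvA_inner_getD (its : List (List Int)) (comb : List Int)
    (d : PySem.Dict (List Int) Int) (k : List Int) :
    (its.foldl (fun d item =>
        if PySem.Set.issubset (PySem.Set.ofList comb) item then
          d.modify comb 0 (fun v => v + 1)
        else d) d).getD k 0
      = d.getD k 0 + (if k = comb then pvM its comb else 0) := by
  induction its generalizing d with
  | nil => simp [pvM]
  | cons item rest ih =>
    simp only [List.foldl_cons]
    by_cases hP : PySem.Set.issubset (PySem.Set.ofList comb) item = true
    · rw [if_pos hP, ih, PySem.Dict.getD_modify]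
      by_cases hk : k = comb
      · subst hk; simp [pvM, hP]; ring
      · simp [hk]
    · rw [if_neg hP, ih]
      by_cases hk : k = comb
      · subst hk; simp [pvM, hP]
      · simp [hk]

-- A's inner loop keeps the key set (comb is already a key)
theorem pvA_inner_keys (its : List (List Int)) (comb : List Int)
    (d : PySem.Dict (List Int) Int) (hc : comb ∈ d.keys) :
    (its.foldl (fun d item =>
        if PySem.Set.issubset (PySem.Set.ofList comb) item then
          d.modify comb 0 (fun v => v + 1)
        else d) d).keys = d.keys := by
  induction its generalizing d with
  | nil => rfl
  | cons item rest ih =>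
    simp only [List.foldl_cons]
    split_ifs with hP
    · have hck : (d.modify comb 0 (fun v => v + 1)).keys = d.keys := by
        rw [PySem.Dict.keys_modify,
          PySem.Dict.keys_insert_of_contains _ _ ((PySem.Dict.contains_iff_mem_keys d comb).mpr hc)]
      rw [ih _ (by rw [hck]; exact hc), hck]
    · exact ih d hc

-- A's outer loop: each occurrence of k in cs adds pvM items k
theorem pvA_outer_getD (items : List (List Int)) (cs : List (List Int))
    (d : PySem.Dict (List Int) Int) (k : List Int) :
    (cs.foldl (fun d comb =>
        items.foldl (fun d item =>
          if PySem.Set.issubset (PySem.Set.ofList comb) item then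
            d.modify comb 0 (fun v => v + 1)
          else d) d) d).getD k 0
      = d.getD k 0 + (cs.count k : Int) * pvM items k := by
  induction cs generalizing d with
  | nil => simp
  | cons c rest ih =>
    simp only [List.foldl_cons]
    rw [ih, pvA_inner_getD, List.count_cons]
    by_cases hk : k = c
    · subst hk; simp; ring
    · have h1 : (c == k) = false := beq_eq_false_iff_ne.mpr (Ne.symm hk)
      simp [hk, h1]

-- A's outer loop keeps the key set when every comb is already a key
theorem pvA_outer_keys (items : List (List Int)) (cs : List (List Int))
    (d : PySem.Dict (List Int) Int) (h : ∀ c ∈ cs, c ∈ d.keys) :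
    (cs.foldl (fun d comb =>
        items.foldl (fun d item =>
          if PySem.Set.issubset (PySem.Set.ofList comb) item then
            d.modify comb 0 (fun v => v + 1)
          else d) d) d).keys = d.keys := by
  induction cs generalizing d with
  | nil => rfl
  | cons c rest ih =>
    simp only [List.foldl_cons]
    have hck := pvA_inner_keys items c d (h c (by simp))
    rw [ih _ (by intro x hx; rw [hck]; exact h x (by simp [hx])), hck]

-- A's first loop: every stored value is 0
theorem pvA_init_getD (cs : List (List Int)) (d : PySem.Dict (List Int) Int) (k : List Int)
    (h : ∀ k', d.getD k' 0 = 0) :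
    (cs.foldl (fun d k => d.insert k 0) d).getD k 0 = 0 := by
  induction cs generalizing d with
  | nil => exact h k
  | cons c rest ih =>
    simp only [List.foldl_cons]
    exact ih _ (fun k' => by rw [PySem.Dict.getD_insert]; split_ifs <;> simp [h])

-- A's first loop: the keys are set(combs)
theorem pvA_init_keys (cs : List (List Int)) :
    (cs.foldl (fun d k => d.insert k 0) (PySem.Dict.empty : PySem.Dict (List Int) Int)).keys
      = PySem.Set.ofList cs := by
  have := PySem.Dict.keys_foldl_insert cs (fun _ _ => (0 : Int)) PySem.Dict.empty
  rw [this, PySem.Dict.keys_empty, PySem.Set.update_nil_left]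

-- port A produces the canonical items list
theorem pvA_canon (combs items : List (List Int)) :
    generateCombsDict combs items = pvCanon combs items := by
  unfold generateCombsDict pvCanon
  have hkeys0 := pvA_init_keys combs
  have hkeys : (combs.foldl (fun d comb =>
      items.foldl (fun d item =>
        if PySem.Set.issubset (PySem.Set.ofList comb) item then
          d.modify comb 0 (fun v => v + 1)
        else d) d)
      (combs.foldl (fun d k => d.insert k 0) (PySem.Dict.empty : PySem.Dict (List Int) Int))).keys
      = PySem.Set.ofList combs := by
    have h := pvA_outer_keys items combs
      (combs.foldl (fun d k => d.insert k 0) PySem.Dict.empty)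
      (fun c hc => by rw [hkeys0]; exact (PySem.Set.mem_ofList combs c).mpr hc)
    exact h.trans hkeys0
  rw [PySem.Dict.items_eq_map_keys _ (by rw [hkeys]; exact PySem.Set.nodup_ofList combs) 0, hkeys]
  apply List.map_congr_left
  intro k _
  rw [pvA_outer_getD, pvA_init_getD _ _ _ (fun k' => PySem.Dict.getD_empty k' 0)]
  ring_nf

-- B's inner counting loop is countP
theorem pvB_count (s : PySem.Set Int) (l : List (PySem.Set Int)) (acc : Int) :
    (l.foldl (fun n it => if PySem.Set.issubset s it then n + 1 else n) acc)
      = acc + (l.countP (fun it => PySem.Set.issubset s it) : Int) := by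
  induction l generalizing acc with
  | nil => simp
  | cons it rest ih =>
    simp only [List.foldl_cons, List.countP_cons]
    split_ifs with h <;> rw [ih] <;> [ (simp; ring) ; simp ]

-- counting over the precomputed item sets is pvM
theorem pvB_count_items (k : List Int) (items : List (List Int)) :
    ((items.map (fun item => PySem.Set.ofList item)).countP
        (fun it => PySem.Set.issubset (PySem.Set.ofList k) it) : Int) = pvM items k := by
  unfold pvM
  rw [List.countP_map]
  congr 1
  apply List.countP_congr
  intro item _
  simp only [Function.comp]
  rw [PySem.Set.issubset_iff, PySem.Set.issubset_iff]
  constructor <;> intro h x hx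
  · exact (PySem.Set.mem_ofList item x).mp (h x hx)
  · exact (PySem.Set.mem_ofList item x).mpr (h x hx)

-- port B produces the canonical items list
theorem pvB_canon (combs items : List (List Int)) :
    generateCombsDict_alt combs items = pvCanon combs items := by
  unfold generateCombsDict_alt pvCanon
  rw [PySem.Dict.foldl_insert_getD_add_one_eq_counter]
  rw [PySem.Dict.items_foldl_insert_fresh _ Prod.fst
    (fun p => p.2 * ((items.map (fun item => PySem.Set.ofList item)).foldl
        (fun n it => if PySem.Set.issubset (PySem.Set.ofList p.1) it then n + 1 else n) 0))
    PySem.Dict.empty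
    (fun _ _ => PySem.Dict.contains_empty _)
    (by rw [PySem.Dict.items_counter, List.map_map]
        have hid : (Prod.fst ∘ fun k : List Int => (k, (List.count k combs : Int))) = id := rfl
        rw [hid, List.map_id]
        exact PySem.Set.nodup_ofList combs)]
  rw [PySem.Dict.items_counter, List.map_map]
  rw [show (PySem.Dict.empty : PySem.Dict (List Int) Int).items = [] from rfl, List.nil_append]
  apply List.map_congr_left
  intro k _
  simp only [Function.comp]
  rw [pvB_count, pvB_count_items]
  ring_nf

-- ===== VERDICT (by name: the statement is the Claim_ definition above) =====
theorem generateCombsDict_spec : Claim_equal_generateCombsDict := by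
  intro combs items _
  unfold Spec_generateCombsDict
  rw [pvA_canon, pvB_canon]
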